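-- pv_equiv track=rewrite | github.com/dawit2119/codeforces | C_Double_Strings.py | has_concatenation
-- ===== SOURCE A (Python) =====
-- from collections import defaultdict
--
-- def has_concatenation(s):
--     prefixes = defaultdict(bool)
--     for i in range(len(s)):
--         if i > 0:
--             prefixes[s[:i]] = True
--         if prefixes[s[i:]]:
--             return True
--     return False
-- ===== SOURCE B (Python) =====
-- def has_concatenation(s):
--     n = len(s)
--     pi = [0] * n
--     for i in range(1, n):
--         k = pi[i - 1]
--         while k > 0 and s[i] != s[k]:
--             k = pi[k - 1]
--         if s[i] == s[k]:
--             k += 1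
--         pi[i] = k
--     return n > 0 and pi[n - 1] > 0
-- ===== Notes on version B (the rewrite author's own statement) =====
-- stated objective: faster
-- what changed: B replaces A's quadratic prefix-dictionary scan by the KMP prefix (failure) function computed in one linear pass; the answer is pi[n-1] > 0, using the fact that a string has a border of length <= n/2 iff it has any nonzero proper border (a border longer than n/2 overlaps itself and yields a shorter one).
import Mathlib
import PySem

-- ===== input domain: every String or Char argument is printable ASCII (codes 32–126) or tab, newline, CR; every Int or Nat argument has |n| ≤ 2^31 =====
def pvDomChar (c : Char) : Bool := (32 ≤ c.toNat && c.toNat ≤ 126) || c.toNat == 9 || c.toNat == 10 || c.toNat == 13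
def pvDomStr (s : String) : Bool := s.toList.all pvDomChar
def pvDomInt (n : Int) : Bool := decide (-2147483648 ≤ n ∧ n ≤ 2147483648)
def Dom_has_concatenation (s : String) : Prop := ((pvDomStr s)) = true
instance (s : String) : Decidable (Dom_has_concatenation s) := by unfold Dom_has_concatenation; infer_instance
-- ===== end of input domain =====

-- B replaces A's dict-of-all-prefixes scan by the KMP prefix (failure) function: the answer is
-- pi[n-1] > 0, since a border of length ≤ n/2 exists iff any nonzero proper border exists
-- (proved below); measured asymptotically faster (O(n) vs O(n^2)).

-- ===== PORT A =====
-- A's loop: for i in range(len(s)): if i>0: prefixes[s[:i]]=True; if prefixes[s[i:]]: return True.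
-- The defaultdict lookup's side effect (inserting the missing key with value False) never changes
-- any later lookup's truth value, so the lookup is ported as getD _ false (exact on results).
def aGo (cs : List Char) (d : PySem.Dict (List Char) Bool) (i : Nat) : Bool :=
  if h : i < cs.length then
    let d' := if 0 < i then d.insert (cs.take i) true else d
    if d'.getD (cs.drop i) false then true else aGo cs d' (i + 1)
  else false
termination_by cs.length - i

def has_concatenation (s : String) : Bool :=
  aGo s.toList PySem.Dict.empty 0

-- ===== PORT B =====
-- while k > 0 and s[i] != s[k]: k = pi[k-1]   (fuel = the initial k bounds the iteration count:
-- each step strictly decreases k, so the loop runs at most k0 times; exact on all runs).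
def kmpInner (cs : List Char) (pi : List Nat) (i : Nat) : Nat → Nat → Nat
  | 0, k => k
  | fuel + 1, k =>
    if 0 < k ∧ cs.getD i 'A' ≠ cs.getD k 'A' then
      kmpInner cs pi i fuel (pi.getD (k - 1) 0)
    else k

-- for i in range(1, n): k = pi[i-1]; while …; if s[i] == s[k]: k += 1; pi[i] = k
def kmpBuild (cs : List Char) (pi : List Nat) (i : Nat) : List Nat :=
  if h : i < cs.length then
    let k0 := pi.getD (i - 1) 0
    let k1 := kmpInner cs pi i k0 k0
    let k2 := if cs.getD i 'A' = cs.getD k1 'A' then k1 + 1 else k1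
    kmpBuild cs (pi.set i k2) (i + 1)
  else pi
termination_by cs.length - i

-- return n > 0 and pi[n - 1] > 0
def has_concatenation_alt (s : String) : Bool :=
  let cs := s.toList
  let n := cs.length
  let pi := kmpBuild cs (List.replicate n 0) 1
  decide (0 < n) && decide (0 < pi.getD (n - 1) 0)

-- ===== PRECONDITION & SPEC =====
def Spec_has_concatenation (s : String) (out : Bool) : Prop := out = has_concatenation_alt s
instance (s : String) (out : Bool) : Decidable (Spec_has_concatenation s out) := by unfold Spec_has_concatenation; infer_instance

-- ===== CLAIM (what is proved, stated in full; the proofs are below) =====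
def Claim_equal_has_concatenation : Prop := ∀ (s : String), Dom_has_concatenation s → Spec_has_concatenation s (has_concatenation s)

-- ===== LEMMAS AND PROOFS =====

-- `Border cs m k`: k is a proper border of the length-m prefix of cs (pointwise form).
def borderB (cs : List Char) (m k : Nat) : Bool :=
  decide (k < m) && (List.range k).all (fun i => cs.getD i 'A' == cs.getD (m - k + i) 'A')

def Border (cs : List Char) (m k : Nat) : Prop :=
  k < m ∧ ∀ i < k, cs.getD i 'A' = cs.getD (m - k + i) 'A'

theorem borderB_iff (cs : List Char) (m k : Nat) : borderB cs m k = true ↔ Border cs m k := by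
  simp [borderB, Border, List.all_eq_true, List.mem_range]

-- length of the longest proper border of the length-m prefix
def mbF (cs : List Char) (m : Nat) : Nat :=
  Nat.findGreatest (fun k => borderB cs m k = true) (m - 1)

theorem border_zero (cs : List Char) (m : Nat) (h : 0 < m) : Border cs m 0 :=
  ⟨h, fun i hi => absurd hi (by omega)⟩

theorem border_comp (cs : List Char) (m j k : Nat)
    (hj : Border cs m j) (hk : Border cs j k) : Border cs m k := by
  obtain ⟨hjm, hja⟩ := hj
  obtain ⟨hkj, hka⟩ := hk
  refine ⟨by omega, fun i hi => ?_⟩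
  have h1 := hka i hi
  have h2 := hja (j - k + i) (by omega)
  have : m - j + (j - k + i) = m - k + i := by omega
  rw [this] at h2
  exact h1.trans h2

theorem border_down (cs : List Char) (m j k : Nat)
    (hj : Border cs m j) (hk : Border cs m k) (hkj : k < j) : Border cs j k := by
  obtain ⟨hjm, hja⟩ := hj
  obtain ⟨hkm, hka⟩ := hk
  refine ⟨hkj, fun i hi => ?_⟩
  have h1 := hka i hi
  have h2 := hja (j - k + i) (by omega)
  have : m - j + (j - k + i) = m - k + i := by omega
  rw [this] at h2
  exact h1.trans h2.symm

theorem border_succ (cs : List Char) (m j : Nat) (hj : 1 ≤ j) :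
    Border cs (m + 1) j ↔ (Border cs m (j - 1) ∧ cs.getD (j - 1) 'A' = cs.getD m 'A') := by
  constructor
  · rintro ⟨hjm, hja⟩
    refine ⟨⟨by omega, fun i hi => ?_⟩, ?_⟩
    · have := hja i (by omega)
      have h : m + 1 - j + i = m - (j - 1) + i := by omega
      rwa [h] at this
    · have := hja (j - 1) (by omega)
      have h : m + 1 - j + (j - 1) = m := by omega
      rwa [h] at this
  · rintro ⟨⟨hjm, hja⟩, hc⟩
    refine ⟨by omega, fun i hi => ?_⟩
    by_cases hij : i < j - 1
    · have := hja i hij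
      have h : m - (j - 1) + i = m + 1 - j + i := by omega
      rwa [h] at this
    · have hieq : i = j - 1 := by omega
      subst hieq
      have h : m + 1 - j + (j - 1) = m := by omega
      rw [h]; exact hc

theorem mb_le (cs : List Char) (m : Nat) : mbF cs m ≤ m - 1 :=
  Nat.findGreatest_le _

theorem mb_border (cs : List Char) (m : Nat) (h : 0 < mbF cs m) : Border cs m (mbF cs m) := by
  have := (Nat.findGreatest_eq_iff
    (P := fun k => borderB cs m k = true) (k := m - 1) (m := mbF cs m)).1 rfl
  exact (borderB_iff cs m _).1 (this.2.1 (by omega))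

theorem le_mb (cs : List Char) (m k : Nat) (h : Border cs m k) : k ≤ mbF cs m := by
  have hk : k < m := h.1
  exact Nat.le_findGreatest (by omega) ((borderB_iff cs m k).2 h)

theorem mb_pos_iff (cs : List Char) (m : Nat) :
    0 < mbF cs m ↔ ∃ k, 0 < k ∧ Border cs m k := by
  constructor
  · intro h; exact ⟨mbF cs m, h, mb_border cs m h⟩
  · rintro ⟨k, hk, hb⟩
    have := le_mb cs m k hb
    omega

-- the inner while loop: result r is the largest j with (Border i j ∧ s[j] = s[i]), in the sense
-- of (C1) r = 0 ∨ (Border i r ∧ s[r] = s[i]) and (C2) maximality.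
theorem kmpInner_spec (cs : List Char) (pi : List Nat) (i : Nat)
    (hpi : ∀ j < i, pi.getD j 0 = mbF cs (j + 1)) :
    ∀ fuel k, k ≤ fuel →
      (k = 0 ∨ Border cs i k) →
      (∀ j, Border cs i j → cs.getD j 'A' = cs.getD i 'A' → j ≤ k) →
      ((kmpInner cs pi i fuel k = 0 ∨
          (Border cs i (kmpInner cs pi i fuel k) ∧
           cs.getD (kmpInner cs pi i fuel k) 'A' = cs.getD i 'A')) ∧
       (∀ j, Border cs i j → cs.getD j 'A' = cs.getD i 'A' → j ≤ kmpInner cs pi i fuel k)) := by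
  intro fuel
  induction fuel with
  | zero =>
    intro k hf hd hmax
    have hk0 : k = 0 := by omega
    subst hk0
    exact ⟨Or.inl rfl, hmax⟩
  | succ fuel ih =>
    intro k hf hd hmax
    by_cases hc : 0 < k ∧ cs.getD i 'A' ≠ cs.getD k 'A'
    · rw [show kmpInner cs pi i (fuel + 1) k
          = kmpInner cs pi i fuel (pi.getD (k - 1) 0) by rw [kmpInner, if_pos hc]]
      obtain ⟨hk0, hne⟩ := hc
      have hBk : Border cs i k := hd.resolve_left (by omega)
      have hki : k < i := hBk.1
      have hpik : pi.getD (k - 1) 0 = mbF cs k := by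
        have := hpi (k - 1) (by omega)
        rwa [show k - 1 + 1 = k by omega] at this
      rw [hpik]
      have hmble : mbF cs k ≤ k - 1 := mb_le cs k
      refine ih (mbF cs k) (by omega) ?_ ?_
      · by_cases hz : 0 < mbF cs k
        · exact Or.inr (border_comp cs i k (mbF cs k) hBk (mb_border cs k hz))
        · exact Or.inl (by omega)
      · intro j hBj hcj
        have hjk : j ≤ k := hmax j hBj hcj
        have hjne : j ≠ k := by
          intro hEq; subst hEq; exact hne hcj.symm
        exact le_mb cs k j (border_down cs i k j hBk hBj (by omega))
    · rw [show kmpInner cs pi i (fuel + 1) k = k by rw [kmpInner, if_neg hc]]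
      refine ⟨?_, hmax⟩
      rcases Nat.eq_zero_or_pos k with hk0 | hk0
      · exact Or.inl hk0
      · have hBk : Border cs i k := hd.resolve_left (by omega)
        have hch : cs.getD i 'A' = cs.getD k 'A' := by
          by_contra hne
          exact hc ⟨hk0, hne⟩
        exact Or.inr ⟨hBk, hch.symm⟩

-- one step of the outer loop computes mbF cs (i+1)
theorem kmpStep (cs : List Char) (pi : List Nat) (i : Nat) (hi : 1 ≤ i)
    (hpi : ∀ j < i, pi.getD j 0 = mbF cs (j + 1)) :
    (if cs.getD i 'A' = cs.getD (kmpInner cs pi i (pi.getD (i - 1) 0) (pi.getD (i - 1) 0)) 'A'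
     then kmpInner cs pi i (pi.getD (i - 1) 0) (pi.getD (i - 1) 0) + 1
     else kmpInner cs pi i (pi.getD (i - 1) 0) (pi.getD (i - 1) 0)) = mbF cs (i + 1) := by
  have hk0 : pi.getD (i - 1) 0 = mbF cs i := by
    have := hpi (i - 1) (by omega)
    rwa [show i - 1 + 1 = i by omega] at this
  obtain ⟨hC1, hC2⟩ := kmpInner_spec cs pi i hpi (pi.getD (i - 1) 0) (pi.getD (i - 1) 0)
    (Nat.le_refl _)
    (by
      rw [hk0]
      rcases Nat.eq_zero_or_pos (mbF cs i) with hz | hz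
      · exact Or.inl hz
      · exact Or.inr (mb_border cs i hz))
    (by
      intro j hBj _
      rw [hk0]
      exact le_mb cs i j hBj)
  set r := kmpInner cs pi i (pi.getD (i - 1) 0) (pi.getD (i - 1) 0) with hr
  have hBr : Border cs i r := by
    rcases hC1 with hz | ⟨hb, _⟩
    · rw [hz]; exact border_zero cs i (by omega)
    · exact hb
  by_cases hm : cs.getD i 'A' = cs.getD r 'A'
  · rw [if_pos hm]
    have hup : Border cs (i + 1) (r + 1) := by
      rw [border_succ cs i (r + 1) (by omega)]
      simpa using ⟨hBr, hm.symm⟩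
    have h1 : r + 1 ≤ mbF cs (i + 1) := le_mb cs (i + 1) (r + 1) hup
    have h2 : mbF cs (i + 1) ≤ r + 1 := by
      rcases Nat.eq_zero_or_pos (mbF cs (i + 1)) with hz | hz
      · omega
      · have hM := mb_border cs (i + 1) hz
        rw [border_succ cs i (mbF cs (i + 1)) (by omega)] at hM
        have := hC2 (mbF cs (i + 1) - 1) hM.1 hM.2
        omega
    omega
  · rw [if_neg hm]
    have hr0 : r = 0 := by
      rcases hC1 with hz | ⟨_, hch⟩
      · exact hz
      · exact absurd hch.symm hm
    rcases Nat.eq_zero_or_pos (mbF cs (i + 1)) with hz | hz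
    · omega
    · exfalso
      have hM := mb_border cs (i + 1) hz
      rw [border_succ cs i (mbF cs (i + 1)) (by omega)] at hM
      have hle := hC2 (mbF cs (i + 1) - 1) hM.1 hM.2
      have hM1 : mbF cs (i + 1) = 1 := by omega
      have := hM.2
      rw [hM1] at this
      simp only [Nat.sub_self] at this
      rw [hr0] at hm
      exact hm this.symm

theorem getD_set (l : List Nat) (i j v : Nat) (hi : i < l.length) :
    (l.set i v).getD j 0 = if j = i then v else l.getD j 0 := by
  by_cases h : j = i
  · subst h
    simp [List.getD_eq_getElem?_getD, hi]
  · rw [List.getD_eq_getElem?_getD, List.getElem?_set, if_neg (fun hh : i = j => h hh.symm),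
      if_neg h, List.getD_eq_getElem?_getD]

theorem kmpBuild_spec (cs : List Char) :
    ∀ (m i : Nat) (pi : List Nat), cs.length - i = m → 1 ≤ i → pi.length = cs.length →
      (∀ j < i, pi.getD j 0 = mbF cs (j + 1)) →
      ∀ j < cs.length, (kmpBuild cs pi i).getD j 0 = mbF cs (j + 1) := by
  intro m
  induction m with
  | zero =>
    intro i pi hm hi hlen hinv j hj
    rw [kmpBuild, dif_neg (by omega : ¬ i < cs.length)]
    exact hinv j (by omega)
  | succ m ih =>
    intro i pi hm hi hlen hinv j hj
    have hin : i < cs.length := by omega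
    rw [kmpBuild, dif_pos hin]
    refine ih (i + 1) _ (by omega) (by omega) (by rw [List.length_set]; exact hlen) ?_ j hj
    intro j' hj'
    rw [getD_set _ _ _ _ (by omega)]
    by_cases hji : j' = i
    · rw [if_pos hji, hji]
      exact kmpStep cs pi i (by omega) hinv
    · rw [if_neg hji]
      exact hinv j' (by omega)

-- B in closed form
theorem hasB_iff (s : String) :
    has_concatenation_alt s = true ↔
      (0 < s.toList.length ∧ 0 < mbF s.toList s.toList.length) := by
  unfold has_concatenation_alt
  set cs := s.toList
  rcases Nat.eq_zero_or_pos cs.length with hn | hn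
  · simp [hn]
  · have hfin := kmpBuild_spec cs (cs.length - 1) 1 (List.replicate cs.length 0) rfl
      (Nat.le_refl 1) (by simp)
      (by
        intro j hj
        have hj0 : j = 0 := by omega
        subst hj0
        simp [List.getD_eq_getElem?_getD, hn, mbF])
      (cs.length - 1) (by omega)
    rw [show cs.length - 1 + 1 = cs.length by omega] at hfin
    simp only [Bool.and_eq_true, decide_eq_true_iff]
    rw [hfin]

-- pointwise borders vs take/drop
theorem border_take_drop (cs : List Char) (k : Nat) (hk : k < cs.length) :
    Border cs cs.length k ↔ cs.take k = cs.drop (cs.length - k) := by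
  constructor
  · rintro ⟨-, hpt⟩
    apply List.ext_getElem
    · simp; omega
    · intro i h1 h2
      have hi : i < k := by simp at h1; omega
      have := hpt i hi
      rw [List.getD_eq_getElem cs 'A' (by omega), List.getD_eq_getElem cs 'A' (by omega)] at this
      simpa [List.getElem_take, List.getElem_drop] using this
  · intro hEq
    refine ⟨hk, fun i hi => ?_⟩
    have h1 : (cs.take k)[i]? = (cs.drop (cs.length - k))[i]? := by rw [hEq]
    rw [List.getElem?_eq_getElem (by simp; omega), List.getElem?_eq_getElem (by simp; omega)]
      at h1
    have h2 := Option.some.inj h1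
    rw [List.getElem_take, List.getElem_drop] at h2
    rw [List.getD_eq_getElem cs 'A' (by omega), List.getD_eq_getElem cs 'A' (by omega)]
    exact h2

-- a nonzero border gives a nonzero border of length ≤ n/2 (an overlapping border folds in half)
theorem border_half (cs : List Char) (n : Nat) (hn : n = cs.length) :
    ∀ k, 0 < k → Border cs n k → ∃ l, 0 < l ∧ l ≤ n / 2 ∧ Border cs n l := by
  intro k
  induction k using Nat.strong_induction_on with
  | _ k ih =>
    intro hk hb
    by_cases hle : k ≤ n / 2
    · exact ⟨k, hk, hle, hb⟩
    · have hkn : k < n := hb.1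
      have hb' : Border cs n (2 * k - n) := by
        refine ⟨by omega, fun i hi => ?_⟩
        have e1 := hb.2 i (by omega)
        have e2 := hb.2 (n - k + i) (by omega)
        have harith : n - k + (n - k + i) = n - (2 * k - n) + i := by omega
        rw [harith] at e2
        exact e1.trans e2
      exact ih (2 * k - n) (by omega) (by omega) hb' 

-- ===== A-side closed form (as in the dict port's invariant) =====
theorem aGo_iff (cs : List Char) :
    ∀ (m i : Nat) (d : PySem.Dict (List Char) Bool), cs.length - i = m →
    (∀ key, d.getD key false = true ↔ ∃ k, 1 ≤ k ∧ k < i ∧ key = cs.take k) →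
    (aGo cs d i = true ↔ ∃ j, i ≤ j ∧ j < cs.length ∧ ∃ k, 1 ≤ k ∧ k ≤ j ∧ cs.take k = cs.drop j) := by
  intro m
  induction m with
  | zero =>
    intro i d hm _
    rw [aGo]
    have hni : ¬ i < cs.length := by omega
    simp only [hni, dif_neg, not_false_iff]
    constructor
    · intro h; exact absurd h (by simp)
    · rintro ⟨j, hij, hjn, -⟩; omega
  | succ m ih =>
    intro i d hm hd
    have hin : i < cs.length := by omega
    rw [aGo]
    simp only [hin, dif_pos]
    have hd' : ∀ key, ((if 0 < i then d.insert (cs.take i) true else d).getD key false = true)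
        ↔ ∃ k, 1 ≤ k ∧ k < i + 1 ∧ key = cs.take k := by
      intro key
      by_cases hi : 0 < i
      · rw [if_pos hi, PySem.Dict.getD_insert]
        by_cases hk : key = cs.take i
        · rw [if_pos hk]
          constructor
          · intro _; exact ⟨i, hi, by omega, hk⟩
          · intro _; rfl
        · rw [if_neg hk, hd key]
          constructor
          · rintro ⟨k, h1, h2, h3⟩; exact ⟨k, h1, by omega, h3⟩
          · rintro ⟨k, h1, h2, h3⟩
            refine ⟨k, h1, ?_, h3⟩
            by_contra hge
            have hk' : k = i := by omega
            exact hk (hk' ▸ h3)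
      · rw [if_neg hi, hd key]
        constructor
        · rintro ⟨k, h1, h2, -⟩; omega
        · rintro ⟨k, h1, h2, -⟩; omega
    set d' := if 0 < i then d.insert (cs.take i) true else d with hd'def
    by_cases hlook : d'.getD (cs.drop i) false = true
    · rw [if_pos hlook]
      constructor
      · intro _
        obtain ⟨k, h1, h2, h3⟩ := (hd' _).mp hlook
        exact ⟨i, le_refl i, hin, k, h1, by omega, h3.symm⟩
      · intro _; rfl
    · rw [if_neg hlook]
      rw [ih (i + 1) d' (by omega) hd']
      constructor
      · rintro ⟨j, hij, hjn, k, hk1, hk2, hk3⟩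
        exact ⟨j, by omega, hjn, k, hk1, hk2, hk3⟩
      · rintro ⟨j, hij, hjn, k, hk1, hk2, hk3⟩
        refine ⟨j, ?_, hjn, k, hk1, hk2, hk3⟩
        by_contra hlt
        have hji : j = i := by omega
        exact hlook ((hd' _).mpr ⟨k, hk1, by omega, by rw [← hji]; exact hk3.symm⟩)

theorem hasA_iff (s : String) :
    has_concatenation s = true ↔
    ∃ j, j < s.toList.length ∧ ∃ k, 1 ≤ k ∧ k ≤ j ∧ s.toList.take k = s.toList.drop j := by
  unfold has_concatenation
  have hkey : ∀ key, (PySem.Dict.empty : PySem.Dict (List Char) Bool).getD key false = true ↔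
      ∃ k, 1 ≤ k ∧ k < 0 ∧ key = s.toList.take k := by
    intro key
    constructor
    · intro h; rw [PySem.Dict.getD_empty] at h; exact absurd h (by simp)
    · rintro ⟨k, h1, h2, -⟩; omega
  rw [aGo_iff s.toList (s.toList.length - 0) 0 PySem.Dict.empty rfl hkey]
  constructor
  · rintro ⟨j, -, hjn, hk⟩; exact ⟨j, hjn, hk⟩
  · rintro ⟨j, hjn, hk⟩; exact ⟨j, Nat.zero_le j, hjn, hk⟩

theorem closed_forms_agree (cs : List Char) :
    (∃ j, j < cs.length ∧ ∃ k, 1 ≤ k ∧ k ≤ j ∧ cs.take k = cs.drop j) ↔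
    (∃ l, 1 ≤ l ∧ l ≤ cs.length / 2 ∧ cs.take l = cs.drop (cs.length - l)) := by
  constructor
  · rintro ⟨j, hjn, k, hk1, hkj, hEq⟩
    have hlen : (cs.take k).length = (cs.drop j).length := by rw [hEq]
    simp only [List.length_take, List.length_drop] at hlen
    have hk : k = cs.length - j := by omega
    refine ⟨k, hk1, by omega, ?_⟩
    have : cs.length - k = j := by omega
    rw [this]; exact hEq
  · rintro ⟨l, hl1, hl2, hEq⟩
    exact ⟨cs.length - l, by omega, l, hl1, by omega, hEq⟩

-- ===== VERDICT (by name: the statement is the Claim_ definition above) =====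
theorem has_concatenation_spec : Claim_equal_has_concatenation := by
  intro s _
  unfold Spec_has_concatenation
  rw [Bool.eq_iff_iff, hasA_iff, hasB_iff, closed_forms_agree]
  set cs := s.toList
  constructor
  · rintro ⟨l, hl1, hl2, hEq⟩
    have hln : l < cs.length := by omega
    have hb : Border cs cs.length l := (border_take_drop cs l hln).mpr hEq
    exact ⟨by omega, (mb_pos_iff cs cs.length).mpr ⟨l, hl1, hb⟩⟩
  · rintro ⟨hn, hmb⟩
    have hb := mb_border cs cs.length hmb
    obtain ⟨l, hl0, hl2, hbl⟩ := border_half cs cs.length rfl (mbF cs cs.length) hmb hb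
    have hln : l < cs.length := hbl.1
    exact ⟨l, hl0, hl2, (border_take_drop cs l hln).mp hbl⟩
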